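-- pv_equiv track=rewrite | github.com/lekez2005/OpenNVRAM | compiler/base/spice_parser.py | group_lines_by_mod
-- ===== SOURCE A (Python) =====
-- from typing import Union, TextIO, List
--
-- MODE_INIT = 0
--
-- MODE_PARSING = 1
--
-- MODE_END = 2
--
-- def group_lines_by_mod(all_lines: List[str]):
--     line_counter = 0
--
--     lines_by_module = []
--
--     mode = MODE_INIT
--
--     current_mod = []
--
--     while line_counter < len(all_lines):
--         # construct a full line
--         line = all_lines[line_counter]
--         line_counter += 1
--         while line_counter < len(all_lines):
--             if all_lines[line_counter].startswith("+"):
--                 line += all_lines[line_counter][1:]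
--                 line_counter += 1
--             else:
--                 break
--
--         if line.startswith(".subckt"):
--             if len(current_mod) > 0:
--                 lines_by_module.append(current_mod)
--             current_mod = [line]
--             mode = MODE_PARSING
--             continue
--         elif line.startswith(".ends"):
--             mode = MODE_END
--             continue
--         if mode == MODE_PARSING:
--             current_mod.append(line)
--
--     if len(current_mod) > 0:
--         lines_by_module.append(current_mod)
--
--     return lines_by_module  # List[List[str]]
-- ===== SOURCE B (Python) =====
-- MODE_INIT = 0
-- MODE_PARSING = 1
-- MODE_END = 2
--
--
-- def group_lines_by_mod(all_lines):
--     # pass 1: fold "+" continuation lines into full logical lines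
--     merged = []
--     for line in all_lines:
--         if merged and line.startswith("+"):
--             merged[-1] += line[1:]
--         else:
--             merged.append(line)
--     # pass 2: group logical lines into modules with a small state machine
--     lines_by_module = []
--     mode = MODE_INIT
--     current_mod = []
--     for line in merged:
--         if line.startswith(".subckt"):
--             if current_mod:
--                 lines_by_module.append(current_mod)
--             current_mod = [line]
--             mode = MODE_PARSING
--         elif line.startswith(".ends"):
--             mode = MODE_END
--         elif mode == MODE_PARSING:
--             current_mod.append(line)
--     if current_mod:
--         lines_by_module.append(current_mod)
--     return lines_by_module
-- ===== Notes on version B (the rewrite author's own statement) =====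
-- stated objective: simpler
-- what changed: Replaces A's nested index-based while loops with two separate linear passes: first fold '+' continuation lines into full logical lines, then group the logical lines with a plain state machine.
import Mathlib
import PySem

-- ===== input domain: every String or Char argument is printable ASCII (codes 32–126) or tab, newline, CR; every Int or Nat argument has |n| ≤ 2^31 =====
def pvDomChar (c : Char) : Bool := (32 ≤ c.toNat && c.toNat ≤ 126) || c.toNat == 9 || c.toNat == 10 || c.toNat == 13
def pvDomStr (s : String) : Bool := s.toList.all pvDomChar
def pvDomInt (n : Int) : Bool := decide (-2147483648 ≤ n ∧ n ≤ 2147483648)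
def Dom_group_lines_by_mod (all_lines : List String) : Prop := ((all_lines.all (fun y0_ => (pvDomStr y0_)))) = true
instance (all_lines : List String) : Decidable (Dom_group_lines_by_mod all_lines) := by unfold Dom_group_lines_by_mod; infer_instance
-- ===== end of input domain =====

-- B separates continuation-line merging from module grouping into two simple passes
-- instead of A's nested index loop (objective: simpler; same return value, same cost).


def MODE_INIT : Int := 0
def MODE_PARSING : Int := 1
def MODE_END : Int := 2

-- ===== PORT A =====
-- A's inner while: consume leading "+" continuation lines, appending their tails to `line`
def pvContA (line : String) (rest : List String) : String × List String :=
  match rest with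
  | [] => (line, [])
  | h :: t =>
    if PySem.Str.startswith h "+" then
      pvContA (line ++ PySem.Str.slice h (some 1) none) t
    else (line, h :: t)

theorem pvContA_snd_length (line : String) (rest : List String) :
    (pvContA line rest).2.length ≤ rest.length := by
  induction rest generalizing line with
  | nil => simp [pvContA]
  | cons h t ih =>
    simp only [pvContA]
    split
    · exact le_trans (ih _) (Nat.le_succ _)
    · simp

-- A's outer while loop, recursion on the remaining (unread) lines
def pvLoopA (rest : List String) (mode : Int) (current_mod : List String)
    (lines_by_module : List (List String)) : List (List String) :=
  match rest with
  | [] => if current_mod.length > 0 then lines_by_module ++ [current_mod] else lines_by_module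
  | h :: t =>
    let p := pvContA h t
    let line := p.1
    if PySem.Str.startswith line ".subckt" then
      pvLoopA p.2 MODE_PARSING [line]
        (if current_mod.length > 0 then lines_by_module ++ [current_mod] else lines_by_module)
    else if PySem.Str.startswith line ".ends" then
      pvLoopA p.2 MODE_END current_mod lines_by_module
    else if mode == MODE_PARSING then
      pvLoopA p.2 mode (current_mod ++ [line]) lines_by_module
    else
      pvLoopA p.2 mode current_mod lines_by_module
termination_by rest.length
decreasing_by all_goals
  (have := pvContA_snd_length h t; simp only [List.length_cons]; omega)

def group_lines_by_mod (all_lines : List String) : List (List String) :=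
  pvLoopA all_lines MODE_INIT [] []

-- ===== PORT B =====
-- pass 1 body: fold a "+" continuation line into the previous logical line
def pvMergeStep (merged : List String) (line : String) : List String :=
  if merged ≠ [] ∧ PySem.Str.startswith line "+" then
    merged.dropLast ++ [merged.getLast! ++ PySem.Str.slice line (some 1) none]
  else
    merged ++ [line]

-- pass 2 body: the grouping state machine on one logical line
def pvGroupStep (st : Int × List String × List (List String)) (line : String) :
    Int × List String × List (List String) :=
  let (mode, current_mod, lines_by_module) := st
  if PySem.Str.startswith line ".subckt" then
    (MODE_PARSING, [line],
      if current_mod.length > 0 then lines_by_module ++ [current_mod] else lines_by_module)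
  else if PySem.Str.startswith line ".ends" then
    (MODE_END, current_mod, lines_by_module)
  else if mode == MODE_PARSING then
    (mode, current_mod ++ [line], lines_by_module)
  else
    st

def group_lines_by_mod_alt (all_lines : List String) : List (List String) :=
  let merged := all_lines.foldl pvMergeStep []
  let st := merged.foldl pvGroupStep (MODE_INIT, [], [])
  if st.2.1.length > 0 then st.2.2 ++ [st.2.1] else st.2.2

-- ===== PRECONDITION & SPEC =====
def Spec_group_lines_by_mod (all_lines : List String) (out : List (List String)) : Prop := out = group_lines_by_mod_alt all_lines
instance (all_lines : List String) (out : List (List String)) : Decidable (Spec_group_lines_by_mod all_lines out) := by unfold Spec_group_lines_by_mod; infer_instance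

-- ===== CLAIM (what is proved, stated in full; the proofs are below) =====
def Claim_equal_group_lines_by_mod : Prop := ∀ (all_lines : List String), Dom_group_lines_by_mod all_lines → Spec_group_lines_by_mod all_lines (group_lines_by_mod all_lines)

-- ===== LEMMAS AND PROOFS =====

theorem mergeStep_ne_nil (xs : List String) (h : String) : pvMergeStep xs h ≠ [] := by
  unfold pvMergeStep; split <;> simp

-- one merge step ignores everything before the last element of a nonempty accumulator
theorem mergeStep_append (acc xs : List String) (h : String) (hxs : xs ≠ []) :
    pvMergeStep (acc ++ xs) h = acc ++ pvMergeStep xs h := by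
  by_cases hp : PySem.Chars.startswith h.toList ['+'] = true
  · rcases (List.eq_nil_or_concat xs) with rfl | ⟨ys, z, rfl⟩
    · exact absurd rfl hxs
    · simp only [List.concat_eq_append, ← List.append_assoc]
      simp [pvMergeStep, hp]
  · simp [pvMergeStep, hp]

-- B's first pass over acc ++ xs never touches acc (xs nonempty)
theorem foldl_mergeStep_factor (rest : List String) :
    ∀ (acc xs : List String), xs ≠ [] →
      List.foldl pvMergeStep (acc ++ xs) rest = acc ++ List.foldl pvMergeStep xs rest := by
  induction rest with
  | nil => intro acc xs _; simp
  | cons h t ih =>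
    intro acc xs hxs
    simp only [List.foldl_cons, mergeStep_append acc xs h hxs]
    exact ih acc _ (mergeStep_ne_nil xs h)

-- B's first pass over acc ++ [line] first runs A's inner while on `line`
theorem foldl_mergeStep_cont (t : List String) :
    ∀ (line : String) (acc : List String),
      List.foldl pvMergeStep (acc ++ [line]) t
        = List.foldl pvMergeStep (acc ++ [(pvContA line t).1]) (pvContA line t).2 := by
  induction t with
  | nil => simp [pvContA]
  | cons h t ih =>
    intro line acc
    by_cases hp : PySem.Str.startswith h "+" = true
    · have hpc : PySem.Chars.startswith h.toList ['+'] = true := by simpa using hp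
      have hstep : pvMergeStep (acc ++ [line]) h
          = acc ++ [line ++ PySem.Str.slice h (some 1) none] := by
        simp [pvMergeStep, hpc]
      simp only [List.foldl_cons, hstep, pvContA, hp, if_pos]
      exact ih _ acc
    · have hpc : ¬ PySem.Chars.startswith h.toList ['+'] = true := by simpa using hp
      simp [pvContA, hpc, List.foldl_cons]

-- the residue of A's inner while never starts with a continuation line
theorem pvContA_snd_head (line : String) (rest : List String) :
    (pvContA line rest).2 = [] ∨
      ∃ h t, (pvContA line rest).2 = h :: t ∧ PySem.Chars.startswith h.toList ['+'] = false := by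
  induction rest generalizing line with
  | nil => left; simp [pvContA]
  | cons h t ih =>
    by_cases hp : PySem.Chars.startswith h.toList ['+'] = true
    · simpa [pvContA, hp] using ih _
    · right
      refine ⟨h, t, by simp [pvContA, hp], by simpa using hp⟩

-- B's first pass, unfolded one logical line at a time
theorem merge_decomp (h : String) (t : List String) :
    List.foldl pvMergeStep [] (h :: t)
      = (pvContA h t).1 :: List.foldl pvMergeStep [] (pvContA h t).2 := by
  have h0 : List.foldl pvMergeStep [] (h :: t) = List.foldl pvMergeStep [h] t := by
    simp [pvMergeStep]
  rw [h0]
  have h1 := foldl_mergeStep_cont t h []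
  simp only [List.nil_append] at h1
  rw [h1]
  rcases pvContA_snd_head h t with he | ⟨r, rs, he, hr⟩
  · simp [he]
  · rw [he]
    have h2 : pvMergeStep [(pvContA h t).1] r = [(pvContA h t).1] ++ [r] := by
      simp [pvMergeStep, hr]
    have h3 : pvMergeStep ([] : List String) r = [r] := by simp [pvMergeStep]
    simp only [List.foldl_cons, h2, h3]
    exact foldl_mergeStep_factor rs [(pvContA h t).1] [r] (by simp)

theorem loopA_eq_passes (n : Nat) : ∀ (rest : List String), rest.length ≤ n →
    ∀ (mode : Int) (cur : List String) (acc : List (List String)),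
      pvLoopA rest mode cur acc =
        (let st := (List.foldl pvMergeStep [] rest).foldl pvGroupStep (mode, cur, acc);
         if st.2.1.length > 0 then st.2.2 ++ [st.2.1] else st.2.2) := by
  induction n with
  | zero =>
    intro rest hlen mode cur acc
    have : rest = [] := List.eq_nil_of_length_eq_zero (Nat.le_zero.mp hlen)
    subst this
    simp [pvLoopA]
  | succ n ih =>
    intro rest hlen mode cur acc
    cases rest with
    | nil => simp [pvLoopA]
    | cons h t =>
      have hlen' : (pvContA h t).2.length ≤ n := by
        have := pvContA_snd_length h t
        simp only [List.length_cons] at hlen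
        omega
      rw [merge_decomp h t, List.foldl_cons]
      simp only [pvLoopA]
      by_cases h1 : PySem.Str.startswith (pvContA h t).1 ".subckt" = true
      · rw [if_pos h1, ih _ hlen']
        have h1c : PySem.Chars.startswith (pvContA h t).1.toList
            ['.', 's', 'u', 'b', 'c', 'k', 't'] = true := by simpa using h1
        have hg : pvGroupStep (mode, cur, acc) (pvContA h t).1
            = (MODE_PARSING, [(pvContA h t).1],
               if cur.length > 0 then acc ++ [cur] else acc) := by
          simp [pvGroupStep, h1c]
        rw [hg]
      · have h1c : PySem.Chars.startswith (pvContA h t).1.toList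
            ['.', 's', 'u', 'b', 'c', 'k', 't'] = false := by simpa using h1
        by_cases h2 : PySem.Str.startswith (pvContA h t).1 ".ends" = true
        · have h2c : PySem.Chars.startswith (pvContA h t).1.toList
              ['.', 'e', 'n', 'd', 's'] = true := by simpa using h2
          rw [if_neg h1, if_pos h2, ih _ hlen']
          have hg : pvGroupStep (mode, cur, acc) (pvContA h t).1 = (MODE_END, cur, acc) := by
            simp [pvGroupStep, h1c, h2c]
          rw [hg]
        · have h2c : PySem.Chars.startswith (pvContA h t).1.toList
              ['.', 'e', 'n', 'd', 's'] = false := by simpa using h2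
          by_cases h3 : (mode == MODE_PARSING) = true
          · rw [if_neg h1, if_neg h2, if_pos h3, ih _ hlen']
            have h3' : mode = MODE_PARSING := by simpa using h3
            have hg : pvGroupStep (mode, cur, acc) (pvContA h t).1
                = (mode, cur ++ [(pvContA h t).1], acc) := by
              simp [pvGroupStep, h1c, h2c, h3']
            rw [hg]
          · rw [if_neg h1, if_neg h2, if_neg h3, ih _ hlen']
            have h3' : ¬ mode = MODE_PARSING := by simpa using h3
            have hg : pvGroupStep (mode, cur, acc) (pvContA h t).1 = (mode, cur, acc) := by
              simp [pvGroupStep, h1c, h2c, h3']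
            rw [hg]

-- ===== VERDICT (by name: the statement is the Claim_ definition above) =====
theorem group_lines_by_mod_spec : Claim_equal_group_lines_by_mod := by
  intro all_lines _hdom
  unfold Spec_group_lines_by_mod group_lines_by_mod group_lines_by_mod_alt
  exact loopA_eq_passes all_lines.length all_lines le_rfl MODE_INIT [] []
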